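-- pv_equiv track=rewrite | github.com/macwu1992/cs-self-learning | cs61a/homework/hw03/parsons_probs/neighbor_digits.py | neighbor_digits
-- ===== SOURCE A (Python) =====
-- def neighbor_digits(num, prev_digit=-1):
--     """
--     Returns the number of digits in num that have the same digit to its right
--     or left.
--     >>> neighbor_digits(111)
--     3
--     >>> neighbor_digits(123)
--     0
--     >>> neighbor_digits(112)
--     2
--     >>> neighbor_digits(1122)
--     4
--     """
--     "*** YOUR CODE HERE ***"
--     cur_pivot = num % 10
--     if num < 10:
--         if cur_pivot == prev_digit:
--             return 1
--         else:
--             return 0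
--
--     if (num // 10) % 10 == num % 10 or cur_pivot == prev_digit:
--         return 1 + neighbor_digits(num // 10, prev_digit = cur_pivot)
--     else:
--         return neighbor_digits(num // 10, prev_digit = prev_digit)
-- ===== SOURCE B (Python) =====
-- def _digits(num):
--     # least-significant-first digit list, arithmetic peel (matches Python floor semantics)
--     ds = []
--     n = num
--     while n >= 10:
--         ds.append(n % 10)
--         n //= 10
--     ds.append(n % 10)
--     return ds
--
-- def neighbor_digits(num, prev_digit=-1):
--     ds = _digits(num)
--     count = 0
--     prev = prev_digit  # phantom neighbour just right of ds[0]
--     for i, d in enumerate(ds):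
--         if d == prev or (i + 1 < len(ds) and d == ds[i + 1]):
--             count += 1
--         prev = d
--     return count
-- ===== Notes on version B (the rewrite author's own statement) =====
-- stated objective: alternative
-- what changed: B builds the digit list once by arithmetic peeling and makes a single scan comparing each digit with its true left and right neighbours, instead of A's recursion that threads a prev_digit state which A fails to update on its else branch.
-- intended difference: On inputs whose digit sequence contains a digit that differs from both of its actual neighbours yet equals the stale reference A carries (the last repeated digit to its right, or prev_digit if none), A overcounts — at the witness num=1211 A returns 3 — while B returns the neighbour count the docstring specifies, 2 at that witness. — e.g. on neighbor_digits(1211, -1): A returns 3, B returns 2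
import Mathlib
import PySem

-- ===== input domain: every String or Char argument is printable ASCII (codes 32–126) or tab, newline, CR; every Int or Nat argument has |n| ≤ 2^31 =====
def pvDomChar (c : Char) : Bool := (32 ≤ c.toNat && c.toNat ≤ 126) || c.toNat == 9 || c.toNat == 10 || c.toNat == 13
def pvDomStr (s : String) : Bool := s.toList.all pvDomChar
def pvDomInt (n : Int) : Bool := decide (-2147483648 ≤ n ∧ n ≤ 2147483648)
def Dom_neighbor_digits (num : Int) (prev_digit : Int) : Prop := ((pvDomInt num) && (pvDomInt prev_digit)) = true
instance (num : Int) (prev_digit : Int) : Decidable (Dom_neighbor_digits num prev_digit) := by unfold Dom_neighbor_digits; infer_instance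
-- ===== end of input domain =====

-- B replaces A's stateful recursion by build-digit-list-then-scan against the true neighbours
-- (objective: alternative); A's stale prev_digit overcount is an intended difference (see D_ below).

-- termination helper for the Int recursions
theorem pv_floordiv_lt (num : Int) (h : ¬ num < 10) :
    (PySem.Int.floordiv num 10).toNat < num.toNat := by
  rw [PySem.Int.floordiv_eq_ediv_of_pos (by norm_num)]
  omega

-- ===== PORT A =====
def neighbor_digits (num : Int) (prev_digit : Int) : Int :=
  let cur_pivot := PySem.Int.mod num 10
  if h : num < 10 then
    if cur_pivot = prev_digit then 1 else 0
  else
    if PySem.Int.mod (PySem.Int.floordiv num 10) 10 = PySem.Int.mod num 10 ∨ cur_pivot = prev_digit then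
      1 + neighbor_digits (PySem.Int.floordiv num 10) cur_pivot
    else
      neighbor_digits (PySem.Int.floordiv num 10) prev_digit
termination_by num.toNat
decreasing_by all_goals exact pv_floordiv_lt num h

-- ===== PORT B =====
-- _digits: least-significant-first digit list by arithmetic peeling
def pvDigits (num : Int) : List Int :=
  if _h : num < 10 then [PySem.Int.mod num 10]
  else PySem.Int.mod num 10 :: pvDigits (PySem.Int.floordiv num 10)
termination_by num.toNat
decreasing_by exact pv_floordiv_lt num _h

-- the scan: carry the previous digit (phantom prev_digit before ds[0]), peek at the next
def pvScan (prev : Int) : List Int → Int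
  | [] => 0
  | d :: rest => (if d = prev ∨ rest.head? = some d then 1 else 0) + pvScan d rest

def neighbor_digits_alt (num : Int) (prev_digit : Int) : Int :=
  pvScan prev_digit (pvDigits num)

-- ===== PRECONDITION & SPEC =====
-- digit sequence of the input in closed form (used only by D_): digit i is (num // 10^i) % 10,
-- and a number 10 or more has log10(num)+1 digits; no recursion, independent of either port
def pvDigitList (num : Int) : List Int :=
  if num < 10 then [PySem.Int.mod num 10]
  else (List.range (Nat.log 10 num.toNat + 1)).map
    (fun i => PySem.Int.mod (PySem.Int.floordiv num ((10:Int)^i)) 10)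

-- A's stale-state spurious-match counter: pA is A's carried prev_digit, pR the true right
-- neighbour; it counts the digits A credits only because they equal a stale pA.
def pvSpur (pA pR : Int) : List Int → Int
  | [] => 0
  | [d] => if d = pA ∧ d ≠ pR then 1 else 0
  | d :: e :: rest =>
      (if d = pA ∧ d ≠ pR ∧ d ≠ e then 1 else 0) +
      pvSpur (if e = d ∨ d = pA then d else pA) d (e :: rest)

-- On inputs whose digit sequence has a digit differing from both actual neighbours but equal to
-- the stale reference A carries (the last repeated digit to its right, or prev_digit if none),
-- A overcounts, returning 3 at the witness num=1211; B returns the neighbour count the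
-- docstring specifies, 2 at that witness.
def D_neighbor_digits (num : Int) (prev_digit : Int) : Prop :=
  pvSpur prev_digit prev_digit (pvDigitList num) ≠ 0
instance (num : Int) (prev_digit : Int) : Decidable (D_neighbor_digits num prev_digit) := by
  unfold D_neighbor_digits; infer_instance

def Spec_neighbor_digits (num : Int) (prev_digit : Int) (out : Int) : Prop :=
  ¬ D_neighbor_digits num prev_digit → out = neighbor_digits_alt num prev_digit
instance (num : Int) (prev_digit : Int) (out : Int) : Decidable (Spec_neighbor_digits num prev_digit out) := by
  unfold Spec_neighbor_digits; infer_instance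

def pvDiffWitness_neighbor_digits : Int × Int := (1211, -1)
def pvDiffWitnessOut_neighbor_digits : Int × Int := (3, 2)

-- ===== CLAIM (what is proved, stated in full; the proofs are below) =====
def Claim_unchanged_neighbor_digits : Prop := ∀ (num : Int) (prev_digit : Int), Dom_neighbor_digits num prev_digit → Spec_neighbor_digits num prev_digit (neighbor_digits num prev_digit)
def Claim_changed_neighbor_digits : Prop := Dom_neighbor_digits (pvDiffWitness_neighbor_digits.1) (pvDiffWitness_neighbor_digits.2) ∧ D_neighbor_digits (pvDiffWitness_neighbor_digits.1) (pvDiffWitness_neighbor_digits.2) ∧ neighbor_digits (pvDiffWitness_neighbor_digits.1) (pvDiffWitness_neighbor_digits.2) = pvDiffWitnessOut_neighbor_digits.1 ∧ neighbor_digits_alt (pvDiffWitness_neighbor_digits.1) (pvDiffWitness_neighbor_digits.2) = pvDiffWitnessOut_neighbor_digits.2 ∧ pvDiffWitnessOut_neighbor_digits.1 ≠ pvDiffWitnessOut_neighbor_digits.2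
def Claim_exact_neighbor_digits : Prop := ∀ (num : Int) (prev_digit : Int), Dom_neighbor_digits num prev_digit → D_neighbor_digits num prev_digit → neighbor_digits num prev_digit ≠ neighbor_digits_alt num prev_digit

-- ===== LEMMAS AND PROOFS =====

-- A rewritten on the digit list: same branch order, same carried state
def pvRunA (p : Int) : List Int → Int
  | [] => 0
  | [d] => if d = p then 1 else 0
  | d :: e :: rest => if e = d ∨ d = p then 1 + pvRunA d (e :: rest) else pvRunA p (e :: rest)

-- one-step equations (keep recursive calls folded)
theorem pvRunA_one (p d : Int) : pvRunA p [d] = if d = p then 1 else 0 := rfl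
theorem pvRunA_cons2 (p d e : Int) (r : List Int) :
    pvRunA p (d :: e :: r) = if e = d ∨ d = p then 1 + pvRunA d (e :: r) else pvRunA p (e :: r) := rfl
theorem pvScan_cons (p d : Int) (r : List Int) :
    pvScan p (d :: r) = (if d = p ∨ r.head? = some d then 1 else 0) + pvScan d r := rfl
theorem pvSpur_one (pA pR d : Int) : pvSpur pA pR [d] = if d = pA ∧ d ≠ pR then 1 else 0 := rfl
theorem pvSpur_cons2 (pA pR d e : Int) (r : List Int) :
    pvSpur pA pR (d :: e :: r) = (if d = pA ∧ d ≠ pR ∧ d ≠ e then 1 else 0) +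
      pvSpur (if e = d ∨ d = pA then d else pA) d (e :: r) := rfl

theorem pvDigits_head (m : Int) : ∃ t, pvDigits m = PySem.Int.mod m 10 :: t := by
  rw [pvDigits]
  split_ifs <;> exact ⟨_, rfl⟩

theorem pvDigitList_eq (num : Int) : pvDigitList num = pvDigits num := by
  induction num using pvDigits.induct with
  | case1 num h => rw [pvDigitList, pvDigits]; simp only [if_pos h, dif_pos h]
  | case2 num h ih =>
      rw [pvDigits, dif_neg h, ← ih, pvDigitList, if_neg h]
      have hediv : PySem.Int.floordiv num 10 = num / 10 :=
        PySem.Int.floordiv_eq_ediv_of_pos (by norm_num)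
      have hf0 : PySem.Int.mod (PySem.Int.floordiv num ((10:Int)^0)) 10 = PySem.Int.mod num 10 := by
        rw [pow_zero, PySem.Int.floordiv_eq_ediv_of_pos (by norm_num), Int.ediv_one]
      have hshift : ∀ i : Nat, PySem.Int.floordiv num ((10:Int)^(i+1)) =
          PySem.Int.floordiv (PySem.Int.floordiv num 10) ((10:Int)^i) := by
        intro i
        rw [hediv, PySem.Int.floordiv_eq_ediv_of_pos (by positivity),
          PySem.Int.floordiv_eq_ediv_of_pos (by positivity),
          Int.ediv_ediv_of_nonneg (by norm_num)]
        ring_nf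
      by_cases hm : PySem.Int.floordiv num 10 < 10
      · have hlt : num < 100 := by rw [hediv] at hm; omega
        have hlog : Nat.log 10 num.toNat = 1 :=
          Nat.log_eq_of_pow_le_of_lt_pow (by simp; omega) (by simp; omega)
        rw [pvDigitList, if_pos hm, hlog]
        simp only [List.range_succ, List.range_zero, List.nil_append, List.map_cons,
          List.map_nil, List.nil_append, List.cons_append]
        rw [hf0, pow_one]
      · have hmt : (PySem.Int.floordiv num 10).toNat = num.toNat / 10 := by
          rw [hediv]; omega
        have hlog : Nat.log 10 num.toNat = Nat.log 10 (PySem.Int.floordiv num 10).toNat + 1 := by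
          rw [hmt, Nat.log_div_base]
          have := Nat.log_pos (by norm_num : 1 < 10) (by omega : 10 ≤ num.toNat)
          omega
        rw [pvDigitList, if_neg hm, hlog, List.range_succ_eq_map]
        simp only [List.map_cons, List.map_map]
        rw [hf0]
        congr 1
        exact List.map_congr_left fun i _ => by
          simp only [Function.comp_apply, Nat.succ_eq_add_one]
          rw [hshift i]

theorem neighbor_digits_eq_runA (num prev : Int) :
    neighbor_digits num prev = pvRunA prev (pvDigits num) := by
  induction num, prev using neighbor_digits.induct with
  | case1 num _cp h =>
      rw [neighbor_digits, pvDigits]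
      simp only [dif_pos h, pvRunA_one]
  | case2 num prev _cp h _ =>
      rw [neighbor_digits, pvDigits]
      simp only [dif_pos h, pvRunA_one]
  | case3 num prev _cp h hbr ih =>
      obtain ⟨t, ht⟩ := pvDigits_head (PySem.Int.floordiv num 10)
      rw [neighbor_digits, pvDigits]
      simp only [dif_neg h]
      rw [if_pos hbr, ht, pvRunA_cons2, if_pos (by tauto), ih, ht]
  | case4 num prev _cp h hbr ih =>
      obtain ⟨t, ht⟩ := pvDigits_head (PySem.Int.floordiv num 10)
      rw [neighbor_digits, pvDigits]
      simp only [dif_neg h]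
      rw [if_neg hbr, ht, pvRunA_cons2, if_neg (by tauto), ih, ht]

-- main accounting lemma: A's list run = B's scan + the spurious-match count, under the
-- reachability invariant (pA = pR, or pR differs from the head — set by A's else branch)
theorem runA_eq_scan_add_spur (ds : List Int) (pA pR : Int)
    (hinv : pA = pR ∨ ds.head? ≠ some pR) :
    pvRunA pA ds = pvScan pR ds + pvSpur pA pR ds := by
  induction ds generalizing pA pR with
  | nil => rfl
  | cons d rest ih =>
      cases rest with
      | nil =>
          rw [pvRunA_one, pvScan_cons, pvSpur_one]
          simp only [List.head?_cons, List.head?_nil] at hinv ⊢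
          by_cases h1 : d = pA <;> by_cases h2 : d = pR <;>
            simp_all [pvScan]
      | cons e rest' =>
          rw [pvRunA_cons2, pvScan_cons, pvSpur_cons2]
          simp only [List.head?_cons, Option.some.injEq] at hinv ⊢
          by_cases hde : e = d
          · rw [if_pos (Or.inl hde), if_pos (Or.inr hde), if_neg (by tauto),
              if_pos (Or.inl hde), ih d d (Or.inl rfl)]
            ring
          · by_cases hpA : d = pA
            · by_cases hpR : d = pR
              · rw [if_pos (Or.inr hpA), if_pos (Or.inl hpR), if_neg (by tauto),
                  if_pos (Or.inr hpA), ih d d (Or.inl rfl)]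
                ring
              · rw [if_pos (Or.inr hpA), if_neg (by tauto),
                  if_pos ⟨hpA, hpR, fun h => hde h.symm⟩,
                  if_pos (Or.inr hpA), ih d d (Or.inl rfl)]
                ring
            · have hpR : d ≠ pR := by
                rcases hinv with h | h
                · rw [← h]; exact hpA
                · exact fun hc => h (hc ▸ rfl)
              rw [if_neg (by tauto), if_neg (by tauto), if_neg (by tauto),
                if_neg (by tauto),
                ih pA d (Or.inr (by simpa using fun hc => hde hc))]
              ring

theorem spur_nonneg (ds : List Int) (pA pR : Int) : 0 ≤ pvSpur pA pR ds := by
  induction ds generalizing pA pR with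
  | nil => norm_num [pvSpur]
  | cons d rest ih =>
      cases rest with
      | nil => rw [pvSpur_one]; split_ifs <;> norm_num
      | cons e rest' =>
          rw [pvSpur_cons2]
          have h := ih (if e = d ∨ d = pA then d else pA) d
          split_ifs at h ⊢ <;> omega

theorem key (num prev : Int) :
    neighbor_digits num prev =
      neighbor_digits_alt num prev + pvSpur prev prev (pvDigitList num) := by
  rw [neighbor_digits_eq_runA, neighbor_digits_alt, pvDigitList_eq,
    runA_eq_scan_add_spur _ _ _ (Or.inl rfl)]

theorem pvDigits_1211 : pvDigits (1211 : Int) = [1, 1, 2, 1] := by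
  rw [pvDigits, dif_neg (by norm_num : ¬(1211:Int) < 10),
    show PySem.Int.floordiv (1211:Int) 10 = 121 from by decide,
    show PySem.Int.mod (1211:Int) 10 = 1 from by decide]
  rw [pvDigits, dif_neg (by norm_num : ¬(121:Int) < 10),
    show PySem.Int.floordiv (121:Int) 10 = 12 from by decide,
    show PySem.Int.mod (121:Int) 10 = 1 from by decide]
  rw [pvDigits, dif_neg (by norm_num : ¬(12:Int) < 10),
    show PySem.Int.floordiv (12:Int) 10 = 1 from by decide,
    show PySem.Int.mod (12:Int) 10 = 2 from by decide]
  rw [pvDigits, dif_pos (by norm_num : (1:Int) < 10),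
    show PySem.Int.mod (1:Int) 10 = 1 from by decide]

-- ===== VERDICT (by name: the statement is the Claim_ definition above) =====
theorem neighbor_digits_spec : Claim_unchanged_neighbor_digits := by
  intro num prev _ hD
  rw [key num prev]
  simp only [D_neighbor_digits, not_not] at hD
  rw [hD, add_zero]

theorem neighbor_digits_changed : Claim_changed_neighbor_digits := by
  unfold Claim_changed_neighbor_digits
  refine ⟨by decide, ?_, ?_, ?_, by decide⟩
  · show D_neighbor_digits 1211 (-1)
    unfold D_neighbor_digits
    rw [pvDigitList_eq, pvDigits_1211]
    decide
  · show neighbor_digits 1211 (-1) = 3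
    rw [neighbor_digits_eq_runA, pvDigits_1211]
    decide
  · show neighbor_digits_alt 1211 (-1) = 2
    rw [neighbor_digits_alt, pvDigits_1211]
    decide

theorem neighbor_digits_tight : Claim_exact_neighbor_digits := by
  intro num prev _ hD
  rw [key num prev]
  have h0 := spur_nonneg (pvDigitList num) prev prev
  simp only [D_neighbor_digits] at hD
  omega
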